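-- pv_equiv track=rewrite | github.com/carterqberry/math215-labs | carterq_math215_lab4.py | gs2_method
-- ===== SOURCE A (Python) =====
-- def gs2_iteration(x,y):
--     new_x = y + 1
--     new_y = (-2*new_x) +5
--
--     list7=[new_x, new_y]
--     return list7
--
-- def gs2_method(n):
--     x_n=0
--     y_n=0
--     list8 = [x_n,y_n]
--     for i in range(n):
--       list8 = gs2_iteration(x_n,y_n)
--       x_n = list8[0]
--       y_n = list8[1]
--     return list8
-- ===== SOURCE B (Python) =====
-- def gs2_method(n):
--     # Closed form: y_k = 1 - (-2)^k, x_k = y_{k-1} + 1; n**-pow is O(log n) multiplications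
--     if n <= 0:
--         return [0, 0]
--     p = (-2) ** (n - 1)
--     return [2 - p, 1 + 2 * p]
-- ===== Notes on version B (the rewrite author's own statement) =====
-- stated objective: faster
-- what changed: Replaces the n-step iteration of the linear map by its closed-form solution y_n = 1-(-2)^n computed with one fast exponentiation.
import Mathlib
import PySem

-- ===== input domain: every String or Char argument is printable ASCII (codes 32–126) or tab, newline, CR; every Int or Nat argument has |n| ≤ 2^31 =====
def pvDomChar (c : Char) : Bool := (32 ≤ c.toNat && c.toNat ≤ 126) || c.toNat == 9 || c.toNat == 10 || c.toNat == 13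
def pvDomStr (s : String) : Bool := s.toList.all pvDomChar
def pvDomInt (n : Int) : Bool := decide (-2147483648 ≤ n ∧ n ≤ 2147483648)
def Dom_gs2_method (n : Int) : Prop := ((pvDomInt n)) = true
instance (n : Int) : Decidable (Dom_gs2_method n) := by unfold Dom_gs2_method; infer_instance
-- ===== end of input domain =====

-- B replaces A's n-step iteration by the closed form y_n = 1-(-2)^n (one exponentiation): asymptotically faster.


-- ===== PORT A =====
def gs2_iteration (x y : Int) : List Int :=
  let new_x := y + 1
  let new_y := (-2 * new_x) + 5
  let list7 := [new_x, new_y]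
  list7

def gs2_method (n : Int) : List Int :=
  let st := (PySem.List.pyRange 0 n 1).foldl
    (fun (st : Int × Int × List Int) _ =>
      let list8 := gs2_iteration st.1 st.2.1
      (list8[0]!, list8[1]!, list8))
    (0, 0, [(0 : Int), 0])
  st.2.2

-- ===== PORT B =====
def gs2_method_alt (n : Int) : List Int :=
  if n ≤ 0 then [0, 0]
  else
    let p : Int := (-2) ^ (n - 1).toNat
    [2 - p, 1 + 2 * p]

-- ===== PRECONDITION & SPEC =====
def Spec_gs2_method (n : Int) (out : List Int) : Prop := out = gs2_method_alt n
instance (n : Int) (out : List Int) : Decidable (Spec_gs2_method n out) := by unfold Spec_gs2_method; infer_instance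

-- ===== CLAIM (what is proved, stated in full; the proofs are below) =====
def Claim_equal_gs2_method : Prop := ∀ (n : Int), Dom_gs2_method n → Spec_gs2_method n (gs2_method n)

-- ===== LEMMAS AND PROOFS =====
-- A's loop body as a function of the state alone (the loop variable is unused)
def gs2_step (st : Int × Int × List Int) : Int × Int × List Int :=
  let list8 := gs2_iteration st.1 st.2.1
  (list8[0]!, list8[1]!, list8)

-- a fold whose body ignores the list elements is an iterate of the body
theorem foldl_ignore {α β : Type} (g : β → β) :
    ∀ (l : List α) (i : β), l.foldl (fun s _ => g s) i = g^[l.length] i := by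
  intro l
  induction l with
  | nil => intro i; rfl
  | cons a t ih =>
      intro i
      simp [List.foldl, Function.iterate_succ_apply, ih]

-- closed form for the state after m+1 iterations
theorem gs2_iterate_closed (m : Nat) :
    gs2_step^[m + 1] (0, 0, [(0 : Int), 0]) =
      (2 - (-2) ^ m, 1 + 2 * (-2 : Int) ^ m,
        [2 - (-2 : Int) ^ m, 1 + 2 * (-2 : Int) ^ m]) := by
  induction m with
  | zero => decide
  | succ k ih =>
      rw [Function.iterate_succ_apply', ih]
      show ((_ : Int × Int × List Int)) = _
      simp only [gs2_step, gs2_iteration, pow_succ]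
      refine Prod.ext ?_ (Prod.ext ?_ ?_)
      · simp; ring
      · simp; ring
      · simp only [List.cons.injEq, and_true]
        constructor <;> ring

theorem gs2_method_eq (n : Int) : gs2_method n = gs2_method_alt n := by
  have h0 : gs2_method n = (gs2_step^[(PySem.List.pyRange 0 n 1).length] (0, 0, [(0:Int), 0])).2.2 := by
    rw [← foldl_ignore]; rfl
  rw [h0, PySem.List.length_pyRange_one]
  unfold gs2_method_alt
  by_cases h : n ≤ 0
  · have hz : (n - 0).toNat = 0 := by omega
    rw [hz]
    simp [h]
  · have h1 : (n - 0).toNat = (n - 1).toNat + 1 := by omega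
    rw [h1, gs2_iterate_closed]
    simp [h]

-- ===== VERDICT (by name: the statement is the Claim_ definition above) =====
theorem gs2_method_spec : Claim_equal_gs2_method := by
  intro n _
  unfold Spec_gs2_method
  exact gs2_method_eq n
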